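-- pv_equiv track=rewrite | github.com/pypi-data/pypi-mirror-404 | packages/miesc/miesc-5.0.1-py3-none-any.whl/src/reports/risk_calculator.py | generate_risk_matrix
-- ===== SOURCE A (Python) =====
-- from typing import Any
--
-- def generate_risk_matrix(
--
--     findings: list[dict[str, Any]]
-- ) -> dict[str, int]:
--     """
--     Generate a 3x3 risk matrix based on impact and likelihood.
--
--     Returns a dict with keys like 'high_high', 'medium_low', etc.
--     containing counts of findings in each cell.
--     """
--     matrix = {
--         "high_high": 0, "high_med": 0, "high_low": 0,
--         "med_high": 0, "med_med": 0, "med_low": 0,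
--         "low_high": 0, "low_med": 0, "low_low": 0,
--     }
--
--     for finding in findings:
--         severity = finding.get("severity", "Medium").lower()
--
--         # Map severity to impact/likelihood
--         if severity == "critical":
--             impact, likelihood = "high", "high"
--         elif severity == "high":
--             impact, likelihood = "high", "med"
--         elif severity == "medium":
--             impact, likelihood = "med", "med"
--         elif severity == "low":
--             impact, likelihood = "low", "med"
--         else:  # info
--             impact, likelihood = "low", "low"
--
--         key = f"{impact}_{likelihood}"
--         if key in matrix:
--             matrix[key] += 1
--
--     return matrix
-- ===== SOURCE B (Python) =====
-- def generate_risk_matrix(findings):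
--     """Per-cell counting: each matrix cell is computed directly as the count of
--     findings whose severity maps to it, instead of classifying finding-by-finding."""
--     def sev(f):
--         return f.get("severity", "Medium").lower()
--
--     def count(name):
--         return sum(1 for f in findings if sev(f) == name)
--
--     known = ("critical", "high", "medium", "low")
--     return {
--         "high_high": count("critical"),
--         "high_med": count("high"),
--         "high_low": 0,
--         "med_high": 0,
--         "med_med": count("medium"),
--         "med_low": 0,
--         "low_high": 0,
--         "low_med": count("low"),
--         "low_low": sum(1 for f in findings if sev(f) not in known),
--     }
-- ===== Notes on version B (the rewrite author's own statement) =====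
-- stated objective: simpler
-- what changed: Replaces the per-finding classify-and-increment loop over a mutable 9-cell dict with a direct table that computes each cell as a count of findings whose severity maps to it.
import Mathlib
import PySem

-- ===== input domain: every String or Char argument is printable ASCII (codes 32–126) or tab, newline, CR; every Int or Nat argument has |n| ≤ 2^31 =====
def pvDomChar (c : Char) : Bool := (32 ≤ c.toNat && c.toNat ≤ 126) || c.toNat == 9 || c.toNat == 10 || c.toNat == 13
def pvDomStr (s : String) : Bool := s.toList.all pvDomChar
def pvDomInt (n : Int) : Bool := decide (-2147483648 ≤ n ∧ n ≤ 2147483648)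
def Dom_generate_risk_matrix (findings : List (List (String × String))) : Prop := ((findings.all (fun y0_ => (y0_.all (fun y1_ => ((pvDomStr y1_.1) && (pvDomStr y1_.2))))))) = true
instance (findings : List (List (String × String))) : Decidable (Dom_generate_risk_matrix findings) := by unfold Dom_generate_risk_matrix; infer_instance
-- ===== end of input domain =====

-- B replaces A's per-finding classify-and-increment loop over a mutable 9-cell dict
-- with a direct table computing each cell as a count of matching findings (objective: simpler).


-- ===== PORT A =====
def pvStepA (matrix : PySem.Dict String Int) (finding : List (String × String)) :
    PySem.Dict String Int :=
  let severity := PySem.Str.lower ((PySem.Dict.mk finding).getD "severity" "Medium")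
  let il : String × String :=
    if severity == "critical" then ("high", "high")
    else if severity == "high" then ("high", "med")
    else if severity == "medium" then ("med", "med")
    else if severity == "low" then ("low", "med")
    else ("low", "low")
  let key := il.1 ++ "_" ++ il.2
  if matrix.contains key then matrix.modify key 0 (· + 1) else matrix

def generate_risk_matrix (findings : List (List (String × String))) : List (String × Int) :=
  (findings.foldl pvStepA
    (PySem.Dict.mk [("high_high", 0), ("high_med", 0), ("high_low", 0),
                    ("med_high", 0), ("med_med", 0), ("med_low", 0),
                    ("low_high", 0), ("low_med", 0), ("low_low", 0)])).items

-- ===== PORT B =====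
def pvSev (f : List (String × String)) : String :=
  PySem.Str.lower ((PySem.Dict.mk f).getD "severity" "Medium")

def generate_risk_matrix_alt (findings : List (List (String × String))) : List (String × Int) :=
  let cnt : String → Int := fun name => (findings.countP (fun f => pvSev f == name) : Int)
  [("high_high", cnt "critical"), ("high_med", cnt "high"), ("high_low", 0),
   ("med_high", 0), ("med_med", cnt "medium"), ("med_low", 0),
   ("low_high", 0), ("low_med", cnt "low"),
   ("low_low", (findings.countP
      (fun f => !(["critical", "high", "medium", "low"].contains (pvSev f))) : Int))]

-- ===== PRECONDITION & SPEC =====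
def Spec_generate_risk_matrix (findings : List (List (String × String))) (out : List (String × Int)) : Prop := out = generate_risk_matrix_alt findings
instance (findings : List (List (String × String))) (out : List (String × Int)) : Decidable (Spec_generate_risk_matrix findings out) := by unfold Spec_generate_risk_matrix; infer_instance

-- ===== CLAIM (what is proved, stated in full; the proofs are below) =====
def Claim_equal_generate_risk_matrix : Prop := ∀ (findings : List (List (String × String))), Dom_generate_risk_matrix findings → Spec_generate_risk_matrix findings (generate_risk_matrix findings)

-- ===== LEMMAS AND PROOFS =====

/-- The shape A's accumulator always has: the 9 fixed keys with five live counters. -/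
def pvMk (a b c d e : Int) : PySem.Dict String Int :=
  PySem.Dict.mk [("high_high", a), ("high_med", b), ("high_low", 0),
                 ("med_high", 0), ("med_med", c), ("med_low", 0),
                 ("low_high", 0), ("low_med", d), ("low_low", e)]

lemma pvFoldA (l : List (List (String × String))) :
    l.foldl pvStepA (pvMk 0 0 0 0 0) =
      pvMk (l.countP (fun f => pvSev f == "critical"))
           (l.countP (fun f => pvSev f == "high"))
           (l.countP (fun f => pvSev f == "medium"))
           (l.countP (fun f => pvSev f == "low"))
           (l.countP (fun f => !(["critical", "high", "medium", "low"].contains (pvSev f)))) := by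
  induction l using List.reverseRecOn with
  | nil => rfl
  | append_singleton l x ih =>
    rw [List.foldl_append, List.foldl_cons, List.foldl_nil, ih]
    simp only [pvStepA]
    rw [show PySem.Str.lower ((PySem.Dict.mk x).getD "severity" "Medium") = pvSev x from rfl]
    simp only [List.countP_append, List.countP_cons, List.countP_nil, Nat.zero_add]
    by_cases h1 : pvSev x = "critical"
    · simp [h1, pvMk, PySem.Dict.modify, PySem.Dict.contains, PySem.Dict.getD,
        PySem.Dict.get?, PySem.Dict.insert]
    · by_cases h2 : pvSev x = "high"
      · simp [h2, pvMk, PySem.Dict.modify, PySem.Dict.contains, PySem.Dict.getD,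
          PySem.Dict.get?, PySem.Dict.insert]
      · by_cases h3 : pvSev x = "medium"
        · simp [h3, pvMk, PySem.Dict.modify, PySem.Dict.contains, PySem.Dict.getD,
            PySem.Dict.get?, PySem.Dict.insert]
        · by_cases h4 : pvSev x = "low"
          · simp [h4, pvMk, PySem.Dict.modify, PySem.Dict.contains, PySem.Dict.getD,
              PySem.Dict.get?, PySem.Dict.insert]
          · simp [h1, h2, h3, h4, pvMk, PySem.Dict.modify, PySem.Dict.contains, PySem.Dict.getD,
              PySem.Dict.get?, PySem.Dict.insert]

-- ===== VERDICT (by name: the statement is the Claim_ definition above) =====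
theorem generate_risk_matrix_spec : Claim_equal_generate_risk_matrix := by
  intro findings _
  show generate_risk_matrix findings = generate_risk_matrix_alt findings
  have h := pvFoldA findings
  simp only [generate_risk_matrix, generate_risk_matrix_alt]
  rw [show (PySem.Dict.mk [("high_high", (0:Int)), ("high_med", 0), ("high_low", 0),
      ("med_high", 0), ("med_med", 0), ("med_low", 0),
      ("low_high", 0), ("low_med", 0), ("low_low", 0)]) = pvMk 0 0 0 0 0 from rfl, h]
  rfl
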